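-- pv_equiv track=rewrite | github.com/alabamagan/mri_normalization_tools | mnts/io/data_formatting.py | _extract_technique_name
-- ===== SOURCE A (Python) =====
-- def _extract_technique_name(tags: dict) -> str:
--     """Extract technique name from DICOM tags."""
--     series_desc = tags.get('0008|103e', '').upper()
--     protocol_name = tags.get('0018|1030', '').upper()
--
--     desc_combined = f"{series_desc} {protocol_name}"
--
--     # Common MR techniques
--     techniques = {
--         'SWI': ['SWI', 'SUSCEPTIBILITY'],
--         'TOF': ['TOF', 'TIME_OF_FLIGHT'],
--         'PWI': ['PWI', 'PERFUSION', 'DSC', 'ASL'],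
--         'MRA': ['MRA', 'ANGIO'],
--         'MRV': ['MRV', 'VENOGRAPHY'],
--         'DTI': ['DTI', 'TENSOR'],
--         'BOLD': ['BOLD', 'FMRI'],
--         'CSF': ['CSF', 'CISS', 'FIESTA'],
--         'MRCP': ['MRCP', 'CHOLANGIO'],
--         'SPACE': ['SPACE', 'CUBE', 'VISTA'],
--         'MPR': ['MPR', 'MULTIPLANAR'],
--         'VIBE': ['VIBE', 'LAVA', 'THRIVE']
--     }
--
--     for technique, keywords in techniques.items():
--         if any(keyword in desc_combined for keyword in keywords):
--             return technique
--
--     # Check for specific sequence names in protocol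
--     if 'MPRAGE' in desc_combined:
--         return 'MPRAGE'
--     elif 'FSPGR' in desc_combined:
--         return 'FSPGR'
--     elif 'FLASH' in desc_combined:
--         return 'FLASH'
--     elif 'TRUFI' in desc_combined:
--         return 'TRUFI'
--     elif 'HASTE' in desc_combined:
--         return 'HASTE'
--     elif 'RARE' in desc_combined or 'TSE' in desc_combined:
--         return 'TSE'
--     elif 'EPI' in desc_combined:
--         return 'EPI'
--
--     return ''  # No specific technique identified
-- ===== SOURCE B (Python) =====
-- _TABLE = [
--     ('SWI', ['SWI', 'SUSCEPTIBILITY']),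
--     ('TOF', ['TOF', 'TIME_OF_FLIGHT']),
--     ('PWI', ['PWI', 'PERFUSION', 'DSC', 'ASL']),
--     ('MRA', ['MRA', 'ANGIO']),
--     ('MRV', ['MRV', 'VENOGRAPHY']),
--     ('DTI', ['DTI', 'TENSOR']),
--     ('BOLD', ['BOLD', 'FMRI']),
--     ('CSF', ['CSF', 'CISS', 'FIESTA']),
--     ('MRCP', ['MRCP', 'CHOLANGIO']),
--     ('SPACE', ['SPACE', 'CUBE', 'VISTA']),
--     ('MPR', ['MPR', 'MULTIPLANAR']),
--     ('VIBE', ['VIBE', 'LAVA', 'THRIVE']),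
--     ('MPRAGE', ['MPRAGE']),
--     ('FSPGR', ['FSPGR']),
--     ('FLASH', ['FLASH']),
--     ('TRUFI', ['TRUFI']),
--     ('HASTE', ['HASTE']),
--     ('TSE', ['RARE', 'TSE']),
--     ('EPI', ['EPI']),
-- ]
--
-- # flat (keyword, priority) list; priority = position of its technique in _TABLE
-- _KEYWORDS = [(kw, i) for i, (_t, kws) in enumerate(_TABLE) for kw in kws]
--
--
-- def _extract_technique_name(tags: dict) -> str:
--     """Extract technique name from DICOM tags.
--
--     Naive multi-pattern scan: walk every start position of the combined
--     description once, record the minimum priority of any keyword matching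
--     there, and map that priority back to its technique at the end.
--     """
--     desc = f"{tags.get('0008|103e', '').upper()} {tags.get('0018|1030', '').upper()}"
--     best = len(_TABLE)
--     for i in range(len(desc)):
--         for kw, p in _KEYWORDS:
--             if p < best and desc.startswith(kw, i):
--                 best = p
--     return _TABLE[best][0] if best < len(_TABLE) else ''
-- ===== Notes on version B (the rewrite author's own statement) =====
-- stated objective: alternative
-- what changed: Instead of testing each technique's keywords for substring membership in table order and returning on the first hit, B does a naive multi-pattern position scan: one pass over every start position of the combined description, accumulating the minimum priority of any keyword that matches there via startswith, then maps that priority back to its technique.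
import Mathlib
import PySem

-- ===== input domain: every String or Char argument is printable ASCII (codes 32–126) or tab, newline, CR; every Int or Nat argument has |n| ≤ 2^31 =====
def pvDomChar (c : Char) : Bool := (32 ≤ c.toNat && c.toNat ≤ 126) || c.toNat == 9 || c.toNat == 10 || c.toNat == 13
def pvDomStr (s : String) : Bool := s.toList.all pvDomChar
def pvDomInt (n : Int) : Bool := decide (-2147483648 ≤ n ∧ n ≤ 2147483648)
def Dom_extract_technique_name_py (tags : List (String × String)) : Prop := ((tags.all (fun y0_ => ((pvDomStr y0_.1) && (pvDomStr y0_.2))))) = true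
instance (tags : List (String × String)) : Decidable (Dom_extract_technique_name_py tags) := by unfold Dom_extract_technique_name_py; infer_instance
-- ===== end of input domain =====

-- B replaces A's per-technique substring tests (dict loop + if-elif cascade, first hit returns)
-- by a naive multi-pattern position scan: one pass over the start positions of the combined
-- description accumulating the minimum priority of any keyword matching there (objective: alternative).

-- ===== PORT A =====
-- the literal `techniques` dict of A, as an insertion-ordered Dict
def pvTechniquesA : PySem.Dict String (List String) := PySem.Dict.mk
  [ ("SWI", ["SWI", "SUSCEPTIBILITY"]),
    ("TOF", ["TOF", "TIME_OF_FLIGHT"]),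
    ("PWI", ["PWI", "PERFUSION", "DSC", "ASL"]),
    ("MRA", ["MRA", "ANGIO"]),
    ("MRV", ["MRV", "VENOGRAPHY"]),
    ("DTI", ["DTI", "TENSOR"]),
    ("BOLD", ["BOLD", "FMRI"]),
    ("CSF", ["CSF", "CISS", "FIESTA"]),
    ("MRCP", ["MRCP", "CHOLANGIO"]),
    ("SPACE", ["SPACE", "CUBE", "VISTA"]),
    ("MPR", ["MPR", "MULTIPLANAR"]),
    ("VIBE", ["VIBE", "LAVA", "THRIVE"]) ]

-- `for technique, keywords in techniques.items(): if any(...): return technique`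
def pvALoop (desc : String) : List (String × List String) → Option String
  | [] => none
  | (t, kws) :: rest =>
      if kws.any (fun k => PySem.Str.isIn k desc) then some t else pvALoop desc rest

def extract_technique_name_py (tags : List (String × String)) : String :=
  let d : PySem.Dict String String := PySem.Dict.mk tags
  let series_desc := PySem.Str.upper (d.getD "0008|103e" "")
  let protocol_name := PySem.Str.upper (d.getD "0018|1030" "")
  let desc_combined := series_desc ++ " " ++ protocol_name
  match pvALoop desc_combined pvTechniquesA.items with
  | some t => t
  | none =>
    if PySem.Str.isIn "MPRAGE" desc_combined then "MPRAGE"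
    else if PySem.Str.isIn "FSPGR" desc_combined then "FSPGR"
    else if PySem.Str.isIn "FLASH" desc_combined then "FLASH"
    else if PySem.Str.isIn "TRUFI" desc_combined then "TRUFI"
    else if PySem.Str.isIn "HASTE" desc_combined then "HASTE"
    else if PySem.Str.isIn "RARE" desc_combined || PySem.Str.isIn "TSE" desc_combined then "TSE"
    else if PySem.Str.isIn "EPI" desc_combined then "EPI"
    else ""

-- ===== PORT B =====
-- Source B's _TABLE literal
def pvTableB : List (String × List String) :=
  [ ("SWI", ["SWI", "SUSCEPTIBILITY"]),
    ("TOF", ["TOF", "TIME_OF_FLIGHT"]),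
    ("PWI", ["PWI", "PERFUSION", "DSC", "ASL"]),
    ("MRA", ["MRA", "ANGIO"]),
    ("MRV", ["MRV", "VENOGRAPHY"]),
    ("DTI", ["DTI", "TENSOR"]),
    ("BOLD", ["BOLD", "FMRI"]),
    ("CSF", ["CSF", "CISS", "FIESTA"]),
    ("MRCP", ["MRCP", "CHOLANGIO"]),
    ("SPACE", ["SPACE", "CUBE", "VISTA"]),
    ("MPR", ["MPR", "MULTIPLANAR"]),
    ("VIBE", ["VIBE", "LAVA", "THRIVE"]),
    ("MPRAGE", ["MPRAGE"]),
    ("FSPGR", ["FSPGR"]),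
    ("FLASH", ["FLASH"]),
    ("TRUFI", ["TRUFI"]),
    ("HASTE", ["HASTE"]),
    ("TSE", ["RARE", "TSE"]),
    ("EPI", ["EPI"]) ]

-- `_KEYWORDS = [(kw, i) for i, (_t, kws) in enumerate(_TABLE) for kw in kws]`
def pvKW : List (String × Int) :=
  (PySem.List.enumerate pvTableB 0).flatMap (fun x => x.2.2.map (fun kw => (kw, x.1)))

def extract_technique_name_py_alt (tags : List (String × String)) : String :=
  let d : PySem.Dict String String := PySem.Dict.mk tags
  let desc := PySem.Str.upper (d.getD "0008|103e" "") ++ " " ++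
              PySem.Str.upper (d.getD "0018|1030" "")
  -- `best = len(_TABLE)` (= 19); two nested for-loops as folds; Python's
  -- `desc.startswith(kw, i)` with 0 ≤ i is exactly the prefix test on desc[i:].
  let best : Int :=
    (PySem.List.pyRange 0 (PySem.Str.len desc) 1).foldl
      (fun b i =>
        pvKW.foldl
          (fun b kp =>
            if kp.2 < b ∧ PySem.Chars.startswith (desc.toList.drop i.toNat) kp.1.toList
            then kp.2 else b) b) 19
  -- `return _TABLE[best][0] if best < len(_TABLE) else ''`
  if best < 19 then (PySem.List.pyGetD pvTableB best ("", [])).1 else ""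

-- ===== PRECONDITION & SPEC =====
def Spec_extract_technique_name_py (tags : List (String × String)) (out : String) : Prop := out = extract_technique_name_py_alt tags
instance (tags : List (String × String)) (out : String) : Decidable (Spec_extract_technique_name_py tags out) := by unfold Spec_extract_technique_name_py; infer_instance

-- ===== CLAIM (what is proved, stated in full; the proofs are below) =====
def Claim_equal_extract_technique_name_py : Prop := ∀ (tags : List (String × String)), Dom_extract_technique_name_py tags → Spec_extract_technique_name_py tags (extract_technique_name_py tags)

-- ===== LEMMAS AND PROOFS =====

-- the first-match predicate both proofs revolve around
def pvPred (desc : String) (e : String × List String) : Bool :=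
  e.2.any (fun k => PySem.Str.isIn k desc)

-- ---- A's dict loop is a first-match search over the items list
theorem pvALoop_eq_find? (desc : String) (l : List (String × List String)) :
    pvALoop desc l = (l.find? (pvPred desc)).map Prod.fst := by
  induction l with
  | nil => rfl
  | cons a l ih =>
    obtain ⟨t, kws⟩ := a
    rw [pvALoop, List.find?_cons]
    cases h : pvPred desc (t, kws) with
    | false =>
        have h' : (kws.any (fun k => PySem.Str.isIn k desc)) = false := h
        rw [h', if_neg (by simp), ih]
    | true =>
        have h' : (kws.any (fun k => PySem.Str.isIn k desc)) = true := h
        rw [h', if_pos rfl]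
        rfl

-- B's table is A's dict items followed by the sequence-name entries, in order
theorem pvTable_split :
    pvTableB = pvTechniquesA.items ++
      [ ("MPRAGE", ["MPRAGE"]), ("FSPGR", ["FSPGR"]), ("FLASH", ["FLASH"]),
        ("TRUFI", ["TRUFI"]), ("HASTE", ["HASTE"]), ("TSE", ["RARE", "TSE"]),
        ("EPI", ["EPI"]) ] := rfl

-- A's whole body (dict loop + if-elif cascade) is one first-match over the 19-entry table
theorem pvA_as_find? (desc : String) :
    (match pvALoop desc pvTechniquesA.items with
     | some t => t
     | none =>
       if PySem.Str.isIn "MPRAGE" desc then "MPRAGE"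
       else if PySem.Str.isIn "FSPGR" desc then "FSPGR"
       else if PySem.Str.isIn "FLASH" desc then "FLASH"
       else if PySem.Str.isIn "TRUFI" desc then "TRUFI"
       else if PySem.Str.isIn "HASTE" desc then "HASTE"
       else if PySem.Str.isIn "RARE" desc || PySem.Str.isIn "TSE" desc then "TSE"
       else if PySem.Str.isIn "EPI" desc then "EPI"
       else "") =
    (match pvTableB.find? (pvPred desc) with
     | some p => p.1
     | none => "") := by
  rw [pvTable_split, List.find?_append, pvALoop_eq_find?]
  cases hfront : pvTechniquesA.items.find? (pvPred desc) with
  | some p => simp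
  | none =>
    simp only [Option.map_none, Option.none_or, List.find?_cons, pvPred, List.any_cons,
      List.any_nil, Bool.or_false]
    repeat' split <;> simp_all [Bool.or_eq_true, not_or]
    by_cases hR : PySem.Chars.isIn ['R','A','R','E'] desc.toList = true <;>
      by_cases hT : PySem.Chars.isIn ['T','S','E'] desc.toList = true <;>
        by_cases hE : PySem.Chars.isIn ['E','P','I'] desc.toList = true <;>
          simp_all

-- ---- generic facts about B's min-accumulating nested folds ----

theorem pvInner_le (q : String × Int → Bool) (l : List (String × Int)) (b : Int) :
    l.foldl (fun b x => if x.2 < b ∧ q x then x.2 else b) b ≤ b := by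
  induction l generalizing b with
  | nil => simp
  | cons y l ih =>
    simp only [List.foldl_cons]
    split
    · exact le_trans (ih _) (by omega)
    · exact ih b

theorem pvInner_le_mem (q : String × Int → Bool) (l : List (String × Int)) (b : Int)
    (x : String × Int) (hx : x ∈ l) (hq : q x = true) :
    l.foldl (fun b x => if x.2 < b ∧ q x then x.2 else b) b ≤ x.2 := by
  induction l generalizing b with
  | nil => cases hx
  | cons y l ih =>
    simp only [List.foldl_cons]
    rcases List.mem_cons.mp hx with rfl | hx'
    · have h1 : (if x.2 < b ∧ q x then x.2 else b) ≤ x.2 := by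
        split
        · omega
        · rename_i h; rw [not_and_or] at h
          rcases h with h | h
          · omega
          · exact absurd hq h
      exact le_trans (pvInner_le q l _) h1
    · exact ih _ hx'

theorem pvInner_lb (q : String × Int → Bool) (l : List (String × Int)) (b c : Int)
    (hc : c ≤ b) (h : ∀ x ∈ l, q x = true → c ≤ x.2) :
    c ≤ l.foldl (fun b x => if x.2 < b ∧ q x then x.2 else b) b := by
  induction l generalizing b with
  | nil => simpa
  | cons y l ih =>
    simp only [List.foldl_cons]
    refine ih _ ?_ (fun x hx hq => h x (List.mem_cons_of_mem _ hx) hq)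
    split
    · rename_i hy; exact h y List.mem_cons_self hy.2
    · exact hc

theorem pvOuter_le (mm : Int → String × Int → Bool) (is : List Int)
    (l : List (String × Int)) (b : Int) :
    is.foldl (fun b i => l.foldl (fun b x => if x.2 < b ∧ mm i x then x.2 else b) b) b ≤ b := by
  induction is generalizing b with
  | nil => simp
  | cons i is ih =>
    simp only [List.foldl_cons]
    exact le_trans (ih _) (pvInner_le _ _ _)

theorem pvOuter_le_mem (mm : Int → String × Int → Bool) (is : List Int)
    (l : List (String × Int)) (b : Int) (i : Int) (x : String × Int)
    (hi : i ∈ is) (hx : x ∈ l) (hm : mm i x = true) :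
    is.foldl (fun b i => l.foldl (fun b x => if x.2 < b ∧ mm i x then x.2 else b) b) b ≤ x.2 := by
  induction is generalizing b with
  | nil => cases hi
  | cons j is ih =>
    simp only [List.foldl_cons]
    rcases List.mem_cons.mp hi with rfl | hi'
    · exact le_trans (pvOuter_le mm is l _) (pvInner_le_mem _ _ _ _ hx hm)
    · exact ih _ hi'

theorem pvOuter_lb (mm : Int → String × Int → Bool) (is : List Int)
    (l : List (String × Int)) (b c : Int)
    (hc : c ≤ b) (h : ∀ i ∈ is, ∀ x ∈ l, mm i x = true → c ≤ x.2) :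
    c ≤ is.foldl (fun b i => l.foldl (fun b x => if x.2 < b ∧ mm i x then x.2 else b) b) b := by
  induction is generalizing b with
  | nil => simpa
  | cons i is ih =>
    simp only [List.foldl_cons]
    refine ih _ ?_ (fun j hj x hx hm => h j (List.mem_cons_of_mem _ hj) x hx hm)
    exact pvInner_lb _ _ _ _ hc (fun x hx hm => h i List.mem_cons_self x hx hm)

-- ---- the keyword list is a faithful flat view of the table ----

-- every (kw, p) in pvKW: kw nonempty, p is a valid table index and kw a keyword of row p
theorem pvKW_sound : ∀ x ∈ pvKW, x.1.toList ≠ [] ∧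
    ∃ jf : Fin 19, x.2 = (jf.1 : Int) ∧ x.1 ∈ (pvTableB[jf.1]'(jf.2)).2 := by decide

-- every keyword of row j appears in pvKW with priority j
theorem pvKW_complete : ∀ jf : Fin 19, ∀ kw ∈ (pvTableB[jf.1]'(jf.2)).2,
    (kw, (jf.1 : Int)) ∈ pvKW := by decide

-- ---- the core equation: B's best = findIdx of the first-match predicate ----

theorem pvBest_eq_findIdx (desc : String) :
    (PySem.List.pyRange 0 (PySem.Str.len desc) 1).foldl
      (fun b i =>
        pvKW.foldl
          (fun b kp =>
            if kp.2 < b ∧ PySem.Chars.startswith (desc.toList.drop i.toNat) kp.1.toList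
            then kp.2 else b) b) 19
    = (pvTableB.findIdx (pvPred desc) : Int) := by
  set j := pvTableB.findIdx (pvPred desc) with hj
  have hlen : pvTableB.length = 19 := rfl
  have hj19 : j ≤ 19 := by rw [hj, ← hlen]; exact List.findIdx_le_length
  set mm : Int → String × Int → Bool :=
    fun i kp => PySem.Chars.startswith (desc.toList.drop i.toNat) kp.1.toList with hmm
  refine le_antisymm ?_ ?_
  · -- best ≤ j
    by_cases hjlt : j < 19
    · have hjl : j < pvTableB.length := by omega
      have hpred : pvPred desc (pvTableB[j]'hjl) = true :=
        List.findIdx_getElem (w := hjl)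
      obtain ⟨kw, hkw, hin⟩ := List.any_eq_true.mp hpred
      -- kw occurs in desc, so it is a prefix of some drop
      have hinfix : kw.toList <:+: desc.toList := (PySem.Str.isIn_iff_infix _ _).mp hin
      have : PySem.Chars.isIn kw.toList desc.toList = true :=
        (PySem.Chars.isIn_iff_infix _ _).mpr hinfix
      obtain ⟨idx, hpre⟩ := (PySem.Chars.exists_prefix_drop_iff_isIn _ _).mpr this
      have hkwne : kw.toList ≠ [] := by
        rcases pvKW_sound (kw, (j : Int)) (pvKW_complete ⟨j, hjl⟩ kw hkw) with ⟨hne, _⟩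
        exact hne
      have hidx : idx < desc.toList.length := by
        by_contra hge
        rw [List.drop_eq_nil_of_le (by omega)] at hpre
        exact hkwne (List.prefix_nil.mp hpre)
      have hmem : ((idx : Int)) ∈ PySem.List.pyRange 0 (PySem.Str.len desc) 1 := by
        rw [PySem.List.mem_pyRange_one]
        constructor
        · exact_mod_cast Nat.zero_le idx
        · simp only [PySem.Str.len_eq]; exact_mod_cast hidx
      have hmatch : mm (idx : Int) (kw, (j : Int)) = true := by
        rw [hmm]
        simp only [Int.toNat_natCast]
        exact (PySem.Chars.startswith_iff _ _).mpr hpre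
      exact pvOuter_le_mem mm _ pvKW 19 (idx : Int) (kw, (j : Int)) hmem
        (pvKW_complete ⟨j, hjl⟩ kw hkw) hmatch
    · have : j = 19 := by omega
      rw [this]
      exact_mod_cast pvOuter_le mm _ pvKW 19
  · -- j ≤ best
    refine pvOuter_lb mm _ pvKW 19 (j : Int) (by exact_mod_cast hj19) ?_
    intro i _ x hx hm
    rcases pvKW_sound x hx with ⟨_, jf, hx2, hkw⟩
    -- x's keyword matches at position i, so it occurs in desc, so row jf satisfies pvPred
    have hpre : x.1.toList <+: desc.toList.drop i.toNat := by
      rw [hmm] at hm; exact (PySem.Chars.startswith_iff _ _).mp hm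
    have hisin : PySem.Chars.isIn x.1.toList desc.toList = true :=
      (PySem.Chars.exists_prefix_drop_iff_isIn _ _).mp ⟨i.toNat, hpre⟩
    have hstr : PySem.Str.isIn x.1 desc = true :=
      (PySem.Str.isIn_iff_infix _ _).mpr ((PySem.Chars.isIn_iff_infix _ _).mp hisin)
    have hpred : pvPred desc (pvTableB[jf.1]'(jf.2)) = true :=
      List.any_eq_true.mpr ⟨x.1, hkw, hstr⟩
    have hjle : j ≤ jf.1 := by
      by_contra hlt
      have : pvPred desc (pvTableB[jf.1]'(jf.2)) = false :=
        List.not_of_lt_findIdx (by omega)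
      rw [this] at hpred; cases hpred
    rw [hx2]
    exact_mod_cast hjle

-- ===== VERDICT (by name: the statement is the Claim_ definition above) =====
theorem extract_technique_name_py_spec : Claim_equal_extract_technique_name_py := by
  intro tags _
  unfold Spec_extract_technique_name_py extract_technique_name_py extract_technique_name_py_alt
  simp only []
  set desc := PySem.Str.upper ((PySem.Dict.mk tags).getD "0008|103e" "") ++ " " ++
              PySem.Str.upper ((PySem.Dict.mk tags).getD "0018|1030" "") with hdesc
  rw [pvA_as_find?, pvBest_eq_findIdx, List.find?_eq_getElem?_findIdx]
  set j := pvTableB.findIdx (pvPred desc) with hj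
  have hlen : pvTableB.length = 19 := rfl
  by_cases hjlt : j < 19
  · have hjl : j < pvTableB.length := by omega
    rw [List.getElem?_eq_getElem hjl]
    simp only []
    rw [if_pos (by exact_mod_cast hjlt),
        PySem.List.pyGetD_eq_getElem _ _ (by exact_mod_cast Nat.zero_le j)
          (by exact_mod_cast hjl)]
    simp
  · have hj19 : j ≤ pvTableB.length := List.findIdx_le_length
    have : j = 19 := by omega
    rw [List.getElem?_eq_none (by omega)]
    simp only []
    rw [if_neg (by omega)]
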